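-- pv_equiv track=rewrite | github.com/XavBertrand/ASR_jetson | src/asr_jetson/postprocessing/meeting_report.py | _canonical_entities_by_label
-- ===== SOURCE A (Python) =====
-- from typing import Any, Dict, List, Optional, Set, Tuple
--
-- def _canonical_entities_by_label(mapping: Dict[str, Any]) -> Dict[str, List[str]]:
--     grouped: Dict[str, List[str]] = {}
--     entities = mapping.get("entities")
--     if not isinstance(entities, list):
--         return grouped
--     for entity in entities:
--         canonical = (entity.get("canonical") or "").strip()
--         if not canonical:
--             continue
--         label = (entity.get("type") or entity.get("label") or "ENTITÉ").strip()
--         if not label: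
--             label = "ENTITÉ"
--         normalized_label = label.upper()
--         grouped.setdefault(normalized_label, [])
--         grouped[normalized_label].append(canonical)
--     for label, names in grouped.items():
--         deduped: List[str] = []
--         seen: Set[str] = set()
--         for name in names:
--             lowered = name.casefold()
--             if lowered in seen:
--                 continue
--             seen.add(lowered)
--             deduped.append(name)
--         grouped[label] = deduped
--     return grouped
-- ===== SOURCE B (Python) =====
-- from typing import Any, Dict, List, Set
--
--
-- def _canonical_entities_by_label(mapping: Dict[str, Any]) -> Dict[str, List[str]]:
--     # Single pass: dedup while grouping, using a per-label set of casefolded names.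
--     grouped: Dict[str, List[str]] = {}
--     seen: Dict[str, Set[str]] = {}
--     entities = mapping.get("entities")
--     if not isinstance(entities, list):
--         return grouped
--     for entity in entities:
--         canonical = (entity.get("canonical") or "").strip()
--         if not canonical:
--             continue
--         label = (entity.get("type") or entity.get("label") or "ENTITÉ").strip() or "ENTITÉ"
--         key = label.upper()
--         lowered = canonical.casefold()
--         bucket = seen.setdefault(key, set())
--         if lowered not in bucket:
--             bucket.add(lowered)
--             grouped.setdefault(key, []).append(canonical)
--     return grouped
-- ===== Notes on version B (the rewrite author's own statement) =====
-- stated objective: simpler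
-- what changed: Replaces A's two-phase design (group everything, then a second dedup loop rewriting every dict value) with a single pass that dedups while grouping, keeping a per-label set of casefolded names.
import Mathlib
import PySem

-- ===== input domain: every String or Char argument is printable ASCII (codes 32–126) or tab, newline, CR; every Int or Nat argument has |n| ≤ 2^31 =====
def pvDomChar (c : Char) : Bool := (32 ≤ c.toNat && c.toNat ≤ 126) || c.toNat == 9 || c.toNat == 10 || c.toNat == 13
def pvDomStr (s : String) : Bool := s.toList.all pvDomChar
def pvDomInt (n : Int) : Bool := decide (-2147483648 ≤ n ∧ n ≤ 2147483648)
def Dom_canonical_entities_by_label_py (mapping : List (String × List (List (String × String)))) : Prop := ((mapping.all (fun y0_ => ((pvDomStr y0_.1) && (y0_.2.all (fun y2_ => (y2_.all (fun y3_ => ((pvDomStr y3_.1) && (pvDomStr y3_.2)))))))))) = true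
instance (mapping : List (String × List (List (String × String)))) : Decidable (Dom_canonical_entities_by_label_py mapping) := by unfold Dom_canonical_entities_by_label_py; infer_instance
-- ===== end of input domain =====

-- B change: A groups everything first and then runs a second dedup loop rewriting every
-- dict value; B does one pass that dedups while grouping (per-label seen-set). Objective: simpler.

-- shared helpers: these lines of Python are identical in A and B
-- '(entity.get("canonical") or "").strip()'  (Python `or`: falsy = None or "")
def pvCanon (e : List (String × String)) : String :=
  PySem.Str.strip (match (PySem.Dict.mk e).get? "canonical" with
                   | some s => if s = "" then "" else s
                   | none => "")

-- '(entity.get("type") or entity.get("label") or "ENTITÉ")' truthiness chain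
def pvOrStr (o : Option String) (y : String) : String :=
  match o with
  | some s => if s = "" then y else s
  | none => y

-- label = (...).strip(); if not label: label = "ENTITÉ"; label.upper()
def pvLabel (e : List (String × String)) : String :=
  let label := PySem.Str.strip
    (pvOrStr ((PySem.Dict.mk e).get? "type") (pvOrStr ((PySem.Dict.mk e).get? "label") "ENTITÉ"))
  let label := if label = "" then "ENTITÉ" else label
  PySem.Str.upper label

-- ===== PORT A =====
-- A's second-phase inner dedup loop (casefold ported as PySem.Str.lower: identical on the ASCII domain)
def pvDedup (names : List String) : List String :=
  (names.foldl
    (fun (acc : List String × PySem.Set String) name =>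
      let lowered := PySem.Str.lower name
      if acc.2.contains lowered then acc
      else (acc.1 ++ [name], acc.2.add lowered))
    ([], PySem.Set.empty)).1

def canonical_entities_by_label_py (mapping : List (String × List (List (String × String)))) : List (String × List String) :=
  let grouped : PySem.Dict String (List String) := PySem.Dict.empty
  match (PySem.Dict.mk mapping).get? "entities" with
  | none => grouped.items                      -- 'not isinstance(entities, list)': key missing
  | some entities =>
      -- first loop: grouped.setdefault(nl, []); grouped[nl].append(canonical)
      let grouped := entities.foldl
        (fun g e =>
          let canonical := pvCanon e
          if canonical = "" then g
          else g.modify (pvLabel e) [] (· ++ [canonical]))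
        grouped
      -- second loop: for label, names in grouped.items(): grouped[label] = deduped
      let grouped := grouped.items.foldl (fun g p => g.insert p.1 (pvDedup p.2)) grouped
      grouped.items

-- ===== PORT B =====
def canonical_entities_by_label_py_alt (mapping : List (String × List (List (String × String)))) : List (String × List String) :=
  let grouped : PySem.Dict String (List String) := PySem.Dict.empty
  let seen : PySem.Dict String (PySem.Set String) := PySem.Dict.empty
  match (PySem.Dict.mk mapping).get? "entities" with
  | none => grouped.items
  | some entities =>
      let st := entities.foldl
        (fun (st : PySem.Dict String (List String) × PySem.Dict String (PySem.Set String)) e =>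
          let canonical := pvCanon e
          if canonical = "" then st
          else
            let key := pvLabel e
            let lowered := PySem.Str.lower canonical   -- casefold: identical on ASCII
            let seen := st.2.setdefault key PySem.Set.empty
            let bucket := seen.getD key PySem.Set.empty
            if bucket.contains lowered then (st.1, seen)
            else (st.1.modify key [] (· ++ [canonical]), seen.insert key (bucket.add lowered)))
        (grouped, seen)
      st.1.items

-- ===== PRECONDITION & SPEC =====
def Spec_canonical_entities_by_label_py (mapping : List (String × List (List (String × String)))) (out : List (String × List String)) : Prop := out = canonical_entities_by_label_py_alt mapping
instance (mapping : List (String × List (List (String × String)))) (out : List (String × List String)) : Decidable (Spec_canonical_entities_by_label_py mapping out) := by unfold Spec_canonical_entities_by_label_py; infer_instance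

-- ===== CLAIM (what is proved, stated in full; the proofs are below) =====
def Claim_equal_canonical_entities_by_label_py : Prop := ∀ (mapping : List (String × List (List (String × String)))), Dom_canonical_entities_by_label_py mapping → Spec_canonical_entities_by_label_py mapping (canonical_entities_by_label_py mapping)

-- ===== LEMMAS AND PROOFS =====

-- the (label, canonical) pairs that survive the 'if not canonical: continue' guard
def pvPairs (es : List (List (String × String))) : List (String × String) :=
  es.filterMap (fun e => if pvCanon e = "" then none else some (pvLabel e, pvCanon e))

-- A's grouping loop over pairs
def pvGroupA (L : List (String × String)) : PySem.Dict String (List String) :=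
  L.foldl (fun d p => d.modify p.1 [] (· ++ [p.2])) PySem.Dict.empty

-- B's fused step over pairs
def pvStepB (st : PySem.Dict String (List String) × PySem.Dict String (PySem.Set String))
    (p : String × String) :
    PySem.Dict String (List String) × PySem.Dict String (PySem.Set String) :=
  if ((st.2.setdefault p.1 PySem.Set.empty).getD p.1 PySem.Set.empty).contains
      (PySem.Str.lower p.2) then
    (st.1, st.2.setdefault p.1 PySem.Set.empty)
  else
    (st.1.modify p.1 [] (· ++ [p.2]),
     (st.2.setdefault p.1 PySem.Set.empty).insert p.1
       (((st.2.setdefault p.1 PySem.Set.empty).getD p.1 PySem.Set.empty).add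
         (PySem.Str.lower p.2)))

def pvFB (L : List (String × String)) :
    PySem.Dict String (List String) × PySem.Dict String (PySem.Set String) :=
  L.foldl pvStepB (PySem.Dict.empty, PySem.Dict.empty)

-- group of key k in L
def pvNames (L : List (String × String)) (k : String) : List String :=
  (L.filter (fun p => p.1 == k)).map Prod.snd

theorem foldl_guard {σ : Type} (F : σ → String × String → σ) (es : List (List (String × String))) (s : σ) :
    es.foldl (fun s e => if pvCanon e = "" then s else F s (pvLabel e, pvCanon e)) s
      = (pvPairs es).foldl F s := by
  induction es generalizing s with
  | nil => rfl
  | cons e es ih =>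
      simp only [pvPairs, List.filterMap_cons, List.foldl_cons]
      by_cases h : pvCanon e = ""
      · simp only [h, if_true]
        exact ih s
      · simp only [if_neg h, List.foldl_cons]
        exact ih _

theorem A_loop_eq (es : List (List (String × String))) :
    es.foldl
      (fun g e =>
        let canonical := pvCanon e
        if canonical = "" then g
        else g.modify (pvLabel e) [] (· ++ [canonical]))
      PySem.Dict.empty = pvGroupA (pvPairs es) := by
  exact foldl_guard (fun g p => g.modify p.1 [] (· ++ [p.2])) es PySem.Dict.empty

theorem B_loop_eq (es : List (List (String × String))) :
    es.foldl
      (fun (st : PySem.Dict String (List String) × PySem.Dict String (PySem.Set String)) e =>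
        let canonical := pvCanon e
        if canonical = "" then st
        else
          let key := pvLabel e
          let lowered := PySem.Str.lower canonical
          let seen := st.2.setdefault key PySem.Set.empty
          let bucket := seen.getD key PySem.Set.empty
          if bucket.contains lowered then (st.1, seen)
          else (st.1.modify key [] (· ++ [canonical]), seen.insert key (bucket.add lowered)))
      (PySem.Dict.empty, PySem.Dict.empty) = pvFB (pvPairs es) := by
  exact foldl_guard pvStepB es (PySem.Dict.empty, PySem.Dict.empty)

-- the running seen-set inside pvDedup
theorem dedup_snd (ns : List String) (a : List String) (s : PySem.Set String) :
    (ns.foldl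
      (fun (acc : List String × PySem.Set String) name =>
        let lowered := PySem.Str.lower name
        if acc.2.contains lowered then acc
        else (acc.1 ++ [name], acc.2.add lowered)) (a, s)).2
      = (ns.map PySem.Str.lower).foldl PySem.Set.add s := by
  induction ns generalizing a s with
  | nil => rfl
  | cons n ns ih =>
      simp only [List.foldl_cons, List.map_cons]
      by_cases h : s.contains (PySem.Str.lower n)
      · simp only [h, if_true]
        rw [ih]
        congr 1
        simp only [PySem.Set.add, h, if_true]
      · simp only [eq_false_of_ne_true h, Bool.false_eq_true, if_false]
        rw [ih]

theorem dedup_snoc (ns : List String) (c : String) :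
    pvDedup (ns ++ [c]) =
      if ((ns.map PySem.Str.lower).foldl PySem.Set.add PySem.Set.empty).contains (PySem.Str.lower c)
      then pvDedup ns else pvDedup ns ++ [c] := by
  unfold pvDedup
  rw [List.foldl_append]
  simp only [List.foldl_cons, List.foldl_nil]
  rw [show (ns.foldl (fun (acc : List String × PySem.Set String) name =>
        let lowered := PySem.Str.lower name
        if acc.2.contains lowered then acc
        else (acc.1 ++ [name], acc.2.add lowered)) ([], PySem.Set.empty))
      = ((ns.foldl (fun (acc : List String × PySem.Set String) name =>
        let lowered := PySem.Str.lower name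
        if acc.2.contains lowered then acc
        else (acc.1 ++ [name], acc.2.add lowered)) ([], PySem.Set.empty)).1,
        (ns.map PySem.Str.lower).foldl PySem.Set.add PySem.Set.empty) from by
      rw [← dedup_snd ns [] PySem.Set.empty]]
  split <;> rfl

theorem foldl_add_eq_ofList (xs : List String) :
    xs.foldl PySem.Set.add PySem.Set.empty = PySem.Set.ofList xs := rfl

theorem pvNames_append_self (L : List (String × String)) (p : String × String) :
    pvNames (L ++ [p]) p.1 = pvNames L p.1 ++ [p.2] := by
  simp [pvNames, List.filter_append]

theorem pvNames_append_ne (L : List (String × String)) (p : String × String) (k : String)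
    (h : k ≠ p.1) : pvNames (L ++ [p]) k = pvNames L k := by
  simp [pvNames, List.filter_append, Ne.symm h]

-- B invariant
theorem fb_inv (L : List (String × String)) :
    (pvFB L).1.keys = PySem.Set.ofList (L.map Prod.fst)
    ∧ (∀ k, (pvFB L).1.getD k [] = pvDedup (pvNames L k))
    ∧ (∀ k, (pvFB L).2.getD k PySem.Set.empty
        = ((pvNames L k).map PySem.Str.lower).foldl PySem.Set.add PySem.Set.empty) := by
  induction L using List.reverseRecOn with
  | nil =>
      exact ⟨rfl, fun k => rfl, fun k => rfl⟩
  | append_singleton L p ih =>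
      obtain ⟨ih1, ih2, ih3⟩ := ih
      have hfb : pvFB (L ++ [p]) = pvStepB (pvFB L) p := by
        unfold pvFB; rw [List.foldl_append]; rfl
      have hbucket :
          ((pvFB L).2.setdefault p.1 PySem.Set.empty).getD p.1 PySem.Set.empty
            = ((pvNames L p.1).map PySem.Str.lower).foldl PySem.Set.add PySem.Set.empty := by
        rw [PySem.Dict.getD_setdefault_self]
        exact ih3 p.1
      by_cases hc :
          (((pvNames L p.1).map PySem.Str.lower).foldl PySem.Set.add PySem.Set.empty).contains
            (PySem.Str.lower p.2) = true
      · -- duplicate inside its label: B leaves grouped unchanged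
        have hstep : pvFB (L ++ [p]) = ((pvFB L).1, (pvFB L).2.setdefault p.1 PySem.Set.empty) := by
          rw [hfb]; unfold pvStepB
          rw [hbucket, if_pos hc]
        have hlowmem : PySem.Str.lower p.2 ∈ (pvNames L p.1).map PySem.Str.lower := by
          have h1 := (PySem.Set.contains_iff _ _).mp hc
          rw [foldl_add_eq_ofList] at h1
          exact (PySem.Set.mem_ofList _ _).mp h1
        have hkeymem : p.1 ∈ L.map Prod.fst := by
          obtain ⟨n, hn, -⟩ := List.mem_map.mp hlowmem
          obtain ⟨q, hq, hq2⟩ := List.mem_map.mp hn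
          have hq3 := List.mem_filter.mp hq
          have hq4 : q.1 = p.1 := by simpa using hq3.2
          exact hq4 ▸ List.mem_map_of_mem hq3.1
        refine ⟨?_, ?_, ?_⟩
        · rw [hstep]
          simp only [List.map_append, List.map_cons, List.map_nil]
          rw [PySem.Set.ofList_append_singleton,
            PySem.Set.add_of_mem ((PySem.Set.mem_ofList _ _).mpr hkeymem)]
          exact ih1
        · intro k
          rw [hstep]
          by_cases hk : k = p.1
          · subst hk
            rw [pvNames_append_self, dedup_snoc, if_pos hc]
            exact ih2 p.1
          · rw [pvNames_append_ne L p k hk]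
            exact ih2 k
        · intro k
          rw [hstep]
          by_cases hk : k = p.1
          · subst hk
            rw [hbucket, pvNames_append_self]
            simp only [List.map_append, List.map_cons, List.map_nil, List.foldl_append,
              List.foldl_cons, List.foldl_nil]
            rw [PySem.Set.add_of_mem]
            rw [foldl_add_eq_ofList]
            exact (PySem.Set.mem_ofList _ _).mpr hlowmem
          · show ((pvFB L).2.setdefault p.1 PySem.Set.empty).getD k PySem.Set.empty = _
            rw [PySem.Dict.getD_eq_get?_getD, PySem.Dict.get?_setdefault_of_ne _ _ hk,
              ← PySem.Dict.getD_eq_get?_getD, pvNames_append_ne L p k hk]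
            exact ih3 k
      · -- first time this (label, casefolded name) pair is seen
        have hstep : pvFB (L ++ [p]) =
            ((pvFB L).1.modify p.1 [] (· ++ [p.2]),
             ((pvFB L).2.setdefault p.1 PySem.Set.empty).insert p.1
               ((((pvNames L p.1).map PySem.Str.lower).foldl PySem.Set.add
                  PySem.Set.empty).add (PySem.Str.lower p.2))) := by
          rw [hfb]; unfold pvStepB
          rw [hbucket, if_neg (by exact fun hh => hc hh)]
        refine ⟨?_, ?_, ?_⟩
        · rw [hstep]
          show ((pvFB L).1.modify p.1 [] (· ++ [p.2])).keys = _
          rw [PySem.Dict.keys_modify]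
          simp only [List.map_append, List.map_cons, List.map_nil]
          rw [PySem.Set.ofList_append_singleton, PySem.Set.add_eq_ite]
          by_cases hm : p.1 ∈ PySem.Set.ofList (L.map Prod.fst)
          · have hcont : (pvFB L).1.contains p.1 = true := by
              rw [PySem.Dict.contains_eq_decide_mem_keys, ih1]
              simpa using hm
            rw [PySem.Dict.keys_insert_of_contains _ _ hcont, if_pos hm]
            exact ih1
          · have hcont : (pvFB L).1.contains p.1 = false := by
              rw [PySem.Dict.contains_eq_decide_mem_keys, ih1]
              simpa using hm
            rw [PySem.Dict.keys_insert_of_not_contains _ _ hcont, if_neg hm, ih1]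
        · intro k
          rw [hstep]
          show ((pvFB L).1.modify p.1 [] (· ++ [p.2])).getD k [] = _
          rw [PySem.Dict.getD_modify]
          by_cases hk : k = p.1
          · subst hk
            rw [if_pos rfl, pvNames_append_self, dedup_snoc, if_neg (fun hh => hc hh), ih2]
          · rw [if_neg hk, pvNames_append_ne L p k hk]
            exact ih2 k
        · intro k
          rw [hstep]
          show (((pvFB L).2.setdefault p.1 PySem.Set.empty).insert p.1 _).getD k PySem.Set.empty = _
          rw [PySem.Dict.getD_insert]
          by_cases hk : k = p.1
          · subst hk
            rw [if_pos rfl, pvNames_append_self]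
            simp only [List.map_append, List.map_cons, List.map_nil, List.foldl_append,
              List.foldl_cons, List.foldl_nil]
          · rw [if_neg hk,
              PySem.Dict.getD_eq_get?_getD, PySem.Dict.get?_setdefault_of_ne _ _ hk,
              ← PySem.Dict.getD_eq_get?_getD, pvNames_append_ne L p k hk]
            exact ih3 k

-- A facts
theorem groupA_keys (L : List (String × String)) :
    (pvGroupA L).keys = PySem.Set.ofList (L.map Prod.fst) := by
  unfold pvGroupA
  rw [PySem.Dict.keys_foldl_modify_key]
  simp [PySem.Set.update, PySem.Set.ofList_eq_foldl]

theorem groupA_getD (L : List (String × String)) (k : String) :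
    (pvGroupA L).getD k [] = pvNames L k := by
  unfold pvGroupA pvNames
  rw [PySem.Dict.getD_foldl_modify_append]
  simp

-- A's second loop: looking up after re-inserting every key
theorem foldl_insert_get?_not_mem (l : List (String × List String)) (g : PySem.Dict String (List String))
    (k : String) (hk : k ∉ l.map Prod.fst) :
    (l.foldl (fun g p => g.insert p.1 (pvDedup p.2)) g).get? k = g.get? k := by
  induction l generalizing g with
  | nil => rfl
  | cons p l ih =>
      simp only [List.foldl_cons]
      have h1 : k ≠ p.1 := by
        intro h; exact hk (by simp [h])
      rw [ih _ (fun h => hk (List.mem_cons_of_mem _ h))]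
      rw [PySem.Dict.get?_insert]
      simp [h1]

theorem foldl_insert_get?_mem (l : List (String × List String)) (g : PySem.Dict String (List String))
    (k : String) (v : List String) (hnd : (l.map Prod.fst).Nodup) (hm : (k, v) ∈ l) :
    (l.foldl (fun g p => g.insert p.1 (pvDedup p.2)) g).get? k = some (pvDedup v) := by
  induction l generalizing g with
  | nil => cases hm
  | cons p l ih =>
      simp only [List.foldl_cons]
      rcases List.mem_cons.mp hm with h1 | h1
      · subst h1
        have hk : k ∉ l.map Prod.fst := by
          rw [List.map_cons] at hnd
          exact (List.nodup_cons.mp hnd).1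
        rw [foldl_insert_get?_not_mem l _ k hk]
        exact PySem.Dict.get?_insert_self ..
      · rw [List.map_cons] at hnd
        exact ih _ (List.nodup_cons.mp hnd).2 h1

theorem foldl_add_self (l : List String) (s : PySem.Set String) (h : ∀ x ∈ l, x ∈ s) :
    l.foldl PySem.Set.add s = s := by
  induction l generalizing s with
  | nil => rfl
  | cons x l ih =>
      simp only [List.foldl_cons]
      have hx : PySem.Set.add s x = s := by
        simp [PySem.Set.add, PySem.Set.contains, h x (List.mem_cons_self ..)]
      rw [hx]
      exact ih s (fun y hy => h y (List.mem_cons_of_mem _ hy))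

theorem main_items (L : List (String × String)) :
    ((pvGroupA L).items.foldl (fun g p => g.insert p.1 (pvDedup p.2)) (pvGroupA L)).items
      = (pvFB L).1.items := by
  obtain ⟨ih1, ih2, -⟩ := fb_inv L
  have hkeysA : (pvGroupA L).keys = PySem.Set.ofList (L.map Prod.fst) := groupA_keys L
  have hndA : (pvGroupA L).keys.Nodup := by rw [hkeysA]; exact PySem.Set.nodup_ofList _
  have hmapfst : (pvGroupA L).items.map Prod.fst = (pvGroupA L).keys := rfl
  have hkeys2 :
      ((pvGroupA L).items.foldl (fun g p => g.insert p.1 (pvDedup p.2)) (pvGroupA L)).keys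
        = (pvGroupA L).keys := by
    rw [PySem.Dict.keys_foldl_insert_key _ Prod.fst (fun _ p => pvDedup p.2), hmapfst]
    show (pvGroupA L).keys.foldl PySem.Set.add (pvGroupA L).keys = _
    exact foldl_add_self _ _ (fun x hx => hx)
  have hnd2 :
      ((pvGroupA L).items.foldl (fun g p => g.insert p.1 (pvDedup p.2)) (pvGroupA L)).keys.Nodup := by
    rw [hkeys2]; exact hndA
  have hndB : (pvFB L).1.keys.Nodup := by rw [ih1]; exact PySem.Set.nodup_ofList _
  rw [PySem.Dict.items_eq_map_keys _ hnd2 [], PySem.Dict.items_eq_map_keys _ hndB []]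
  rw [hkeys2, hkeysA, ← ih1]
  apply List.map_congr_left
  intro k hk
  have hkmem : k ∈ (pvGroupA L).keys := by rw [hkeysA, ← ih1]; exact hk
  have hsome : (pvGroupA L).get? k ≠ none :=
    fun hh => ((PySem.Dict.get?_eq_none_iff_not_mem_keys _ _).mp hh) hkmem
  obtain ⟨v, hv⟩ := Option.ne_none_iff_exists'.mp hsome
  have hvval : v = pvNames L k := by
    have := PySem.Dict.getD_eq_get?_getD (pvGroupA L) k []
    rw [hv, groupA_getD] at this
    simpa using this.symm
  have hget2 := foldl_insert_get?_mem (pvGroupA L).items (pvGroupA L) k v hndA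
    (PySem.Dict.mem_items_of_get?_eq_some _ hv)
  congr 1
  rw [PySem.Dict.getD_eq_get?_getD, hget2, ih2 k, hvval]
  rfl

-- ===== VERDICT (by name: the statement is the Claim_ definition above) =====
theorem canonical_entities_by_label_py_spec : Claim_equal_canonical_entities_by_label_py := by
  unfold Claim_equal_canonical_entities_by_label_py
  intro mapping _
  unfold Spec_canonical_entities_by_label_py
  unfold canonical_entities_by_label_py canonical_entities_by_label_py_alt
  cases h : (PySem.Dict.mk mapping).get? "entities" with
  | none => rfl
  | some es =>
      dsimp only
      rw [A_loop_eq es, B_loop_eq es]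
      exact main_items (pvPairs es)
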